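-- pv_equiv track=rewrite | github.com/guoziqingbupt/Lintcode-Answer | the longest common prefix ii.py | the_longest_common_prefix
-- ===== SOURCE A (Python) =====
-- def the_longest_common_prefix(dic, target):
--     result = 0
--     for string in dic:
--         index = 0
--         while index < len(string) and index < len(target):
--             if string[index] == target[index]:
--                 index += 1
--                 result = max(result, index)
--             else:
--                 break
--     return result
-- ===== SOURCE B (Python) =====
-- def the_longest_common_prefix(dic, target):
--     best = 0
--     candidates = dic
--     for i in range(len(target)):
--         ch = target[i]
--         candidates = [s for s in candidates if i < len(s) and s[i] == ch]
--         if not candidates: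
--             break
--         best = i + 1
--     return best
-- ===== Notes on version B (the rewrite author's own statement) =====
-- stated objective: alternative
-- what changed: Swapped the loop nesting: instead of scanning each dictionary string against target with a running max, B walks target position by position, narrowing the set of candidate strings that still share the prefix (an implicit trie descent) and stopping as soon as the candidate set empties.
import Mathlib
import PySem

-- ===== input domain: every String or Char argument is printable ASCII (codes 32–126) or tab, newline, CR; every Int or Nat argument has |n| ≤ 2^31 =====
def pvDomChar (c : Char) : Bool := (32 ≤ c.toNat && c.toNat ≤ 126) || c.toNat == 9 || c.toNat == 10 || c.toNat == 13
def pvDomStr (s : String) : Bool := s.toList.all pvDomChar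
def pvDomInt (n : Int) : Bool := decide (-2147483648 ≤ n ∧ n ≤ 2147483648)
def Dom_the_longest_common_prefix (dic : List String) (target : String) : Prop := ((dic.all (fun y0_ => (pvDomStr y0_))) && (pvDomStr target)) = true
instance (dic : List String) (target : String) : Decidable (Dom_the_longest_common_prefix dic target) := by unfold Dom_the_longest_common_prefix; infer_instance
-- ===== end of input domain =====

-- B swaps the loop nesting: it walks target position by position, narrowing the
-- candidate set of strings that still share the prefix (an implicit trie descent),
-- instead of A's per-string scan with a running max.

-- ===== PORT A =====
-- A's inner while loop: walk both strings in lockstep from `index`, updating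
-- `result = max(result, index+1)` on each character match, stop at first mismatch.
def pvInnerA : List Char → List Char → Int → Int → Int
  | c :: s', d :: t', index, result =>
      if c = d then pvInnerA s' t' (index + 1) (max result (index + 1)) else result
  | _, _, _, result => result

def the_longest_common_prefix (dic : List String) (target : String) : Int :=
  dic.foldl (fun result s => pvInnerA s.toList target.toList 0 result) 0

-- ===== PORT B =====
-- B's loop over target's positions: filter candidates by the i-th character,
-- break when none remain, else record best = i+1.
def pvLoopB : List String → Nat → List Char → Int → Int
  | _, _, [], best => best
  | candidates, i, ch :: rest, best =>
      let cands := candidates.filter (fun s => s.toList[i]? == some ch)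
      if cands = [] then best else pvLoopB cands (i + 1) rest (Int.ofNat (i + 1))

def the_longest_common_prefix_alt (dic : List String) (target : String) : Int :=
  pvLoopB dic 0 target.toList 0

-- ===== PRECONDITION & SPEC =====
def Spec_the_longest_common_prefix (dic : List String) (target : String) (out : Int) : Prop := out = the_longest_common_prefix_alt dic target
instance (dic : List String) (target : String) (out : Int) : Decidable (Spec_the_longest_common_prefix dic target out) := by unfold Spec_the_longest_common_prefix; infer_instance

-- ===== CLAIM (what is proved, stated in full; the proofs are below) =====
def Claim_equal_the_longest_common_prefix : Prop := ∀ (dic : List String) (target : String), Dom_the_longest_common_prefix dic target → Spec_the_longest_common_prefix dic target (the_longest_common_prefix dic target)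

-- ===== LEMMAS AND PROOFS =====

-- mathematical longest-common-prefix length of two char lists
def lcpN : List Char → List Char → Nat
  | c :: s', d :: t' => if c = d then lcpN s' t' + 1 else 0
  | _, _ => 0

lemma lcpN_cons (c d : Char) (s t : List Char) :
    lcpN (c :: s) (d :: t) = if c = d then lcpN s t + 1 else 0 := rfl

lemma lcpN_nil_right (s : List Char) : lcpN s [] = 0 := by cases s <;> rfl

-- max of a list of naturals
def maxL (l : List Nat) : Nat := l.foldr max 0

lemma maxL_cons (a : Nat) (l : List Nat) : maxL (a :: l) = max a (maxL l) := rfl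

lemma maxL_map_zero {α : Type} (l : List α) (f : α → Nat) (h : ∀ x ∈ l, f x = 0) :
    maxL (l.map f) = 0 := by
  induction l with
  | nil => rfl
  | cons a l ih =>
    rw [List.map_cons, maxL_cons, h a (by simp), ih (fun x hx => h x (by simp [hx]))]
    rfl

-- A's inner loop computes max result (index + lcpN), given index ≤ result
lemma pvInnerA_eq (s t : List Char) :
    ∀ (i r : Int), i ≤ r → pvInnerA s t i r = max r (i + (lcpN s t : Int)) := by
  induction s generalizing t with
  | nil =>
    intro i r h
    cases t <;> simp [pvInnerA, lcpN] <;> omega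
  | cons c s' ih =>
    intro i r h
    cases t with
    | nil => simp [pvInnerA, lcpN_nil_right]; omega
    | cons d t' =>
      by_cases hc : c = d
      · have hrec := ih t' (i + 1) (max r (i + 1)) (le_max_right _ _)
        simp only [pvInnerA, if_pos hc, hrec, lcpN_cons]
        push_cast
        omega
      · simp only [pvInnerA, if_neg hc, lcpN_cons]
        push_cast
        omega

lemma foldA_eq (dic : List String) (t : List Char) :
    ∀ r : Int, 0 ≤ r →
      dic.foldl (fun result s => pvInnerA s.toList t 0 result) r
        = max r ((maxL (dic.map (fun s => lcpN s.toList t)) : Nat) : Int) := by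
  induction dic with
  | nil => intro r h; simp [maxL]; omega
  | cons a l ih =>
    intro r h
    have h1 := pvInnerA_eq a.toList t 0 r h
    simp only [List.foldl_cons, h1, List.map_cons, maxL_cons]
    rw [ih _ (by omega)]
    push_cast
    omega

-- filtering facts about lcpN at position i
lemma lcpN_drop_hit (l : List Char) (i : Nat) (ch : Char) (rest : List Char)
    (h : l[i]? = some ch) :
    lcpN (l.drop i) (ch :: rest) = lcpN (l.drop (i + 1)) rest + 1 := by
  have hi : i < l.length := by
    by_contra hge
    rw [List.getElem?_eq_none (l := l) (by omega)] at h
    simp at h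
  have hd : l.drop i = l[i] :: l.drop (i + 1) := (List.getElem_cons_drop hi).symm
  have hch : l[i] = ch := by
    rw [List.getElem?_eq_getElem hi] at h
    exact Option.some.inj h
  rw [hd, hch, lcpN_cons, if_pos rfl]

lemma lcpN_drop_miss (l : List Char) (i : Nat) (ch : Char) (rest : List Char)
    (h : ¬ l[i]? = some ch) :
    lcpN (l.drop i) (ch :: rest) = 0 := by
  by_cases hi : i < l.length
  · have hd : l.drop i = l[i] :: l.drop (i + 1) := (List.getElem_cons_drop hi).symm
    have hne : l[i] ≠ ch := fun he => h (by rw [List.getElem?_eq_getElem hi, he])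
    rw [hd, lcpN_cons, if_neg hne]
  · rw [List.drop_eq_nil_of_le (by omega)]
    rfl

-- maxL over a list whose p-elements map to g+1 and others to 0
lemma maxL_filter_step (l : List String) (p : String → Bool) (f g : String → Nat)
    (hf : ∀ s ∈ l, if p s then f s = g s + 1 else f s = 0) :
    maxL (l.map f)
      = if l.filter p = [] then 0 else maxL ((l.filter p).map g) + 1 := by
  induction l with
  | nil => simp [maxL]
  | cons a l ih =>
    have ha := hf a (by simp)
    have ih' := ih (fun s hs => hf s (by simp [hs]))
    by_cases hp : p a
    · have ha' : f a = g a + 1 := by simpa [hp] using ha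
      have hfc : (a :: l).filter p = a :: l.filter p := by simp [hp]
      rw [hfc, if_neg (List.cons_ne_nil _ _), List.map_cons, maxL_cons, List.map_cons,
        maxL_cons, ha', ih']
      by_cases hl : l.filter p = []
      · rw [if_pos hl, hl, List.map_nil]
        show max (g a + 1) 0 = max (g a) (maxL []) + 1
        simp [maxL]
      · rw [if_neg hl]
        omega
    · have hp' : p a = false := by simpa using hp
      have ha0 : f a = 0 := by simpa [hp'] using ha
      have hfc : (a :: l).filter p = l.filter p := by simp [hp']
      rw [List.map_cons, maxL_cons, ha0, Nat.zero_max, ih', hfc]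

-- B's loop: with best = i, it returns i + max over candidates of lcpN of the i-suffix
lemma pvLoopB_eq (chars : List Char) :
    ∀ (C : List String) (i : Nat),
      pvLoopB C i chars ((i : Nat) : Int)
        = ((i + maxL (C.map (fun s => lcpN (s.toList.drop i) chars)) : Nat) : Int) := by
  induction chars with
  | nil =>
    intro C i
    rw [maxL_map_zero C _ (fun s _ => lcpN_nil_right _)]
    rfl
  | cons ch rest ih =>
    intro C i
    have hstep := maxL_filter_step C (fun s => s.toList[i]? == some ch)
      (fun s => lcpN (s.toList.drop i) (ch :: rest))
      (fun s => lcpN (s.toList.drop (i + 1)) rest)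
      (by
        intro s _
        by_cases h : s.toList[i]? = some ch
        · simp [h, lcpN_drop_hit s.toList i ch rest h]
        · simp [h, lcpN_drop_miss s.toList i ch rest h])
    by_cases hc : C.filter (fun s => s.toList[i]? == some ch) = []
    · rw [if_pos hc] at hstep
      simp only [pvLoopB, if_pos hc, hstep, Nat.add_zero]
    · rw [if_neg hc] at hstep
      have ih' := ih (C.filter (fun s => s.toList[i]? == some ch)) (i + 1)
      simp only [pvLoopB, if_neg hc, Int.ofNat_eq_natCast, Nat.cast_add, Nat.cast_one]
      push_cast at ih' ⊢
      rw [ih', hstep]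
      push_cast
      omega

-- ===== VERDICT (by name: the statement is the Claim_ definition above) =====
theorem the_longest_common_prefix_spec : Claim_equal_the_longest_common_prefix := by
  intro dic target _
  unfold Spec_the_longest_common_prefix the_longest_common_prefix the_longest_common_prefix_alt
  have hA := foldA_eq dic target.toList 0 le_rfl
  have hB := pvLoopB_eq target.toList dic 0
  simp only [List.drop_zero, Nat.cast_zero] at hB
  rw [hA, hB]
  push_cast
  omega
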